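-- pv_equiv track=rewrite | github.com/HadjSassi/geekshack3 | scode/KoalaCoders/prob14/main.py | min_permutations_to_palindrome
-- ===== SOURCE A (Python) =====
-- def is_palindrome(s):
--     return s == s[::-1]
--
-- def min_permutations_to_palindrome(input_str):
--     if not isinstance(input_str, str):
--         return -1
--
--     input_str = input_str.lower()
--     if is_palindrome(input_str):
--         return 0
--
--     char_counts = {}
--     odd_count = 0
--
--     for char in input_str:
--         if char.isalpha():
--             char_counts[char] = char_counts.get(char, 0) + 1
--
--     for count in char_counts.values():
--         if count % 2 != 0:
--             odd_count += 1
--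
--     if odd_count > 1:
--         return -1
--
--     return (len(input_str) - odd_count) // 2
-- ===== SOURCE B (Python) =====
-- def _odd_letters(letters):
--     # letters is a list of alphabetic chars; recursively pick the first letter,
--     # count all its occurrences, drop them, and recurse on the remainder.
--     if not letters:
--         return 0
--     c = letters[0]
--     k = letters.count(c)
--     rest = [x for x in letters if x != c]
--     return k % 2 + _odd_letters(rest)
--
-- def min_permutations_to_palindrome(input_str):
--     if not isinstance(input_str, str):
--         return -1
--     s = input_str.lower()
--     if s == s[::-1]:
--         return 0
--     letters = [c for c in s if c.isalpha()]
--     odd_count = _odd_letters(letters)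
--     if odd_count > 1:
--         return -1
--     return (len(s) - odd_count) // 2
-- ===== Notes on version B (the rewrite author's own statement) =====
-- stated objective: alternative
-- what changed: Replaced the frequency dictionary plus a second pass over its values by a recursive select-count-and-remove scheme: pick the first remaining letter, count its occurrences in one scan, filter them all out, and recurse on the shrunken list, summing the parities.
import Mathlib
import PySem

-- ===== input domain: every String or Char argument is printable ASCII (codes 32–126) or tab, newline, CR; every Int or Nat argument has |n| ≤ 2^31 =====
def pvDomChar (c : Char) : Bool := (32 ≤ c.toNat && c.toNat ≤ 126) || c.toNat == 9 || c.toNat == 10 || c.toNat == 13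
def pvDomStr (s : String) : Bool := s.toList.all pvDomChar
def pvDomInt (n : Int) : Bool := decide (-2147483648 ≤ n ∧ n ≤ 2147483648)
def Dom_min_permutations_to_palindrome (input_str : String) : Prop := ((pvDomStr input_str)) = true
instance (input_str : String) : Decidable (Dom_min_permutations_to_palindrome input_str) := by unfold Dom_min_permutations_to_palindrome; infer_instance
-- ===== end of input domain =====

-- B replaces A's frequency dictionary plus second pass over its values by a recursive
-- select-count-and-remove scheme (take the first remaining letter, count it, filter it out,
-- recurse), summing the parities; same results, a genuinely different decomposition.
-- (Lean's input is typed String, so A's 'isinstance' guard is vacuous and not ported.)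

-- ===== PORT A =====
-- is_palindrome(s): s == s[::-1]
def is_palindrome (s : List Char) : Bool :=
  PySem.List.slice? s none none (-1) == some s

def min_permutations_to_palindrome (input_str : String) : Int :=
  let s := PySem.Chars.lower input_str.toList
  if is_palindrome s then 0
  else
    let char_counts : PySem.Dict Char Int :=
      s.foldl (fun d c =>
        if PySem.Chars.isalpha c then d.insert c (d.getD c 0 + 1) else d) PySem.Dict.empty
    let odd_count : Int :=
      char_counts.values.foldl (fun n v => if PySem.Int.mod v 2 ≠ 0 then n + 1 else n) 0
    if odd_count > 1 then -1
    else PySem.Int.floordiv ((PySem.Chars.len s : Int) - odd_count) 2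

-- ===== PORT B =====
-- _odd_letters(letters): pick letters[0], count it, filter it out, recurse.
def odd_letters : List Char → Int
  | [] => 0
  | c :: t =>
    let k : Int := (PySem.List.count (c :: t) c : Int)
    let rest := (c :: t).filter (fun x => x != c)
    PySem.Int.mod k 2 + odd_letters rest
termination_by l => l.length
decreasing_by
  simp only [List.filter_cons, bne_self_eq_false, List.length_cons]
  exact Nat.lt_succ_of_le (List.length_filter_le _ t)

def min_permutations_to_palindrome_alt (input_str : String) : Int :=
  let s := PySem.Chars.lower input_str.toList
  if PySem.List.slice? s none none (-1) == some s then 0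
  else
    let letters := s.filter PySem.Chars.isalpha
    let odd_count := odd_letters letters
    if odd_count > 1 then -1
    else PySem.Int.floordiv ((PySem.Chars.len s : Int) - odd_count) 2

-- ===== PRECONDITION & SPEC =====
def Spec_min_permutations_to_palindrome (input_str : String) (out : Int) : Prop := out = min_permutations_to_palindrome_alt input_str
instance (input_str : String) (out : Int) : Decidable (Spec_min_permutations_to_palindrome input_str out) := by unfold Spec_min_permutations_to_palindrome; infer_instance

-- ===== CLAIM (what is proved, stated in full; the proofs are below) =====
def Claim_equal_min_permutations_to_palindrome : Prop := ∀ (input_str : String), Dom_min_permutations_to_palindrome input_str → Spec_min_permutations_to_palindrome input_str (min_permutations_to_palindrome input_str)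

-- ===== LEMMAS AND PROOFS =====

lemma pv_modbool (m : Nat) : (decide (PySem.Int.mod (m : Int) 2 ≠ 0)) = (m % 2 == 1) := by
  have h2 : ((2 : Nat) : Int) = 2 := by norm_num
  rw [← h2, PySem.Int.mod_natCast]
  rcases Nat.mod_two_eq_zero_or_one m with h | h <;> simp [h]

-- A's odd_count (dict + value pass) is the number of odd-count members of set(f).
lemma pv_oddA (f : List Char) :
    ((f.foldl (fun d c => d.insert c (d.getD c 0 + 1)) PySem.Dict.empty).values.foldl
        (fun n v => if PySem.Int.mod v 2 ≠ 0 then n + 1 else n) (0 : Int))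
      = ((PySem.Set.ofList f).countP (fun c => f.count c % 2 == 1) : Int) := by
  rw [PySem.Dict.foldl_insert_getD_add_one_eq_counter,
    PySem.List.foldl_ite_add_one (fun v => PySem.Int.mod v 2 ≠ 0)]
  have hv : (PySem.Dict.counter f).values
      = (PySem.Set.ofList f).map (fun k => ((f.count k : Int))) := by
    show ((PySem.Dict.counter f).items).map Prod.snd = _
    rw [PySem.Dict.items_counter]
    simp [Function.comp]
  rw [hv, List.countP_map]
  have : ((fun v => decide (PySem.Int.mod v 2 ≠ 0)) ∘ fun k => ((f.count k : Int)))
      = fun c => f.count c % 2 == 1 := by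
    funext c
    simp only [Function.comp]
    exact pv_modbool (f.count c)
  rw [this]
  simp

-- B's recursion computes the same number.
lemma pv_oddB (f : List Char) :
    odd_letters f = ((PySem.Set.ofList f).countP (fun c => f.count c % 2 == 1) : Int) := by
  induction f using odd_letters.induct with
  | case1 => simp [odd_letters, PySem.Set.ofList_nil]
  | case2 c t rest ih =>
    rw [odd_letters]
    simp only [rest, List.filter_cons, bne_self_eq_false, Bool.false_eq_true, if_false] at ih ⊢
    rw [ih]
    -- rewrite the IH's predicate (counts in the filtered tail) to counts in (c :: t)
    have hpred : (PySem.Set.ofList (t.filter (fun x => x != c))).countP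
          (fun d => (t.filter (fun x => x != c)).count d % 2 == 1)
        = (PySem.Set.ofList (t.filter (fun x => x != c))).countP
          (fun d => (c :: t).count d % 2 == 1) := by
      apply List.countP_congr
      intro x hx
      have hx' : x ∈ t.filter (fun y => y != c) := (PySem.Set.mem_ofList _ _).mp hx
      have hxc : (fun y => y != c) x = true := (List.mem_filter.mp hx').2
      rw [List.count_filter (p := fun y => y != c) hxc,
        List.count_cons_of_ne (Ne.symm (by simpa using hxc))]
    rw [hpred]
    -- the distinct elements of the filtered tail are those of t minus c
    have hperm : (PySem.Set.ofList (t.filter (fun x => x != c))).Perm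
        ((PySem.Set.ofList t).discard c) := by
      unfold PySem.Set.discard
      rw [List.perm_ext_iff_of_nodup (PySem.Set.nodup_ofList _)
        ((PySem.Set.nodup_ofList t).filter _)]
      intro a
      simp only [PySem.Set.mem_ofList, List.mem_filter]
      exact Iff.rfl
    rw [hperm.countP_eq, PySem.Set.ofList_cons, List.countP_cons]
    -- head contribution: parity of the count of c
    have hk : PySem.Int.mod ((PySem.List.count (c :: t) c : Nat) : Int) 2
        = (((c :: t).count c % 2 : Nat) : Int) := by
      rw [PySem.List.count_eq]
      exact_mod_cast PySem.Int.mod_natCast ((c :: t).count c) 2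
    rw [hk]
    split_ifs with hif <;> simp only [beq_iff_eq] at hif <;> push_cast <;> omega

-- the two filtered loops see the same letter list
lemma pv_main (l : List Char) :
    ((l.foldl (fun d c =>
        if PySem.Chars.isalpha c then d.insert c (d.getD c 0 + 1) else d)
        PySem.Dict.empty).values.foldl
        (fun n v => if PySem.Int.mod v 2 ≠ 0 then n + 1 else n) (0 : Int))
      = odd_letters (l.filter PySem.Chars.isalpha) := by
  rw [PySem.List.foldl_if_eq_foldl_filter PySem.Chars.isalpha
      (fun (d : PySem.Dict Char Int) c => d.insert c (d.getD c 0 + 1)),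
    pv_oddA, pv_oddB]

-- ===== VERDICT (by name: the statement is the Claim_ definition above) =====
theorem min_permutations_to_palindrome_spec : Claim_equal_min_permutations_to_palindrome := by
  intro s _
  unfold Spec_min_permutations_to_palindrome min_permutations_to_palindrome
    min_permutations_to_palindrome_alt is_palindrome
  by_cases hp :
      (PySem.List.slice? (PySem.Chars.lower s.toList) none none (-1)
        == some (PySem.Chars.lower s.toList)) = true
  · simp only [hp, if_true]
  · simp only [hp, if_false, Bool.false_eq_true]
    rw [pv_main (PySem.Chars.lower s.toList)]
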